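-- pv_equiv track=rewrite | github.com/djbm10/Investment-alpha-engine | src/diagnostics/regime_false_positives.py | _build_cluster_lookup
-- ===== SOURCE A (Python) =====
-- def _build_cluster_lookup(flagged_indices: list[int]) -> dict[int, int]:
--     clusters: dict[int, int] = {}
--     if not flagged_indices:
--         return clusters
--
--     current_cluster = [flagged_indices[0]]
--     for index in flagged_indices[1:]:
--         if index == current_cluster[-1] + 1:
--             current_cluster.append(index)
--             continue
--         for cluster_index in current_cluster:
--             clusters[cluster_index] = len(current_cluster)
--         current_cluster = [index]
--
--     for cluster_index in current_cluster:
--         clusters[cluster_index] = len(current_cluster)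
--     return clusters
-- ===== SOURCE B (Python) =====
-- def _build_cluster_lookup(flagged_indices: list[int]) -> dict[int, int]:
--     n = len(flagged_indices)
--     # backward sweep: end[p] = exclusive end position of the +1-run containing p
--     end = [0] * n
--     for p in range(n - 1, -1, -1):
--         if p + 1 < n and flagged_indices[p + 1] == flagged_indices[p] + 1:
--             end[p] = end[p + 1]
--         else:
--             end[p] = p + 1
--     # forward sweep: start[p] = start position of the +1-run containing p
--     start = [0] * n
--     for p in range(n):
--         if p > 0 and flagged_indices[p] == flagged_indices[p - 1] + 1:
--             start[p] = start[p - 1]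
--         else:
--             start[p] = p
--     return {flagged_indices[p]: end[p] - start[p] for p in range(n)}
-- ===== Notes on version B (the rewrite author's own statement) =====
-- stated objective: alternative
-- what changed: Replaces A's single pass with a growing current_cluster buffer and per-run flush by three staged array passes: a backward sweep filling end[p] (exclusive run end), a forward sweep filling start[p] (run start), and a dict comprehension assigning end[p]-start[p] to each element.
import Mathlib
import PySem

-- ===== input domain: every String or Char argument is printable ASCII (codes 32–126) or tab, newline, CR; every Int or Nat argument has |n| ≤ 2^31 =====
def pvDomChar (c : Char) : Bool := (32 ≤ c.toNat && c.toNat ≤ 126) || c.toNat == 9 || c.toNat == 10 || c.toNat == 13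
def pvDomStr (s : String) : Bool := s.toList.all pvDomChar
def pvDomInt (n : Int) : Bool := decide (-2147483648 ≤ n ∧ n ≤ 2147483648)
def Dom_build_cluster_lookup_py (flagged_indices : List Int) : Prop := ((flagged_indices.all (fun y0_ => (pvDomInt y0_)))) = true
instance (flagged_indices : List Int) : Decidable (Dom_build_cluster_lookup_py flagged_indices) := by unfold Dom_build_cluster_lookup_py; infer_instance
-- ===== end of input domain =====

-- B replaces A's one pass with a run buffer by three staged array passes (backward run-end sweep, forward run-start sweep, dict comprehension); objective: alternative, return value only.

-- ===== PORT A =====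
-- flush: 'for cluster_index in current_cluster: clusters[cluster_index] = len(current_cluster)'
def pyA_flush (clusters : PySem.Dict Int Int) (cur : List Int) : PySem.Dict Int Int :=
  cur.foldl (fun d x => d.insert x (cur.length : Int)) clusters

-- the 'for index in flagged_indices[1:]' loop, then the trailing flush
def pyA_loop (clusters : PySem.Dict Int Int) (cur : List Int) : List Int → PySem.Dict Int Int
  | [] => pyA_flush clusters cur
  | index :: rest =>
    if index = (PySem.List.pyGet? cur (-1)).getD 0 + 1 then
      pyA_loop clusters (cur ++ [index]) rest
    else
      pyA_loop (pyA_flush clusters cur) [index] rest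

def build_cluster_lookup_py (flagged_indices : List Int) : List (Int × Int) :=
  match flagged_indices with
  | [] => (PySem.Dict.empty : PySem.Dict Int Int).items
  | x :: rest => (pyA_loop PySem.Dict.empty [x] rest).items

-- ===== PORT B =====
-- backward sweep 'for p in range(n-1, -1, -1)': the first pattern argument is the number
-- of positions still to fill; it processes p = n-1, …, 0 (indices always in range, so
-- List.getD/List.set are exact for the Python list reads/writes)
def altEndLoop (xs : List Int) (n : Nat) : Nat → List Int → List Int
  | 0, e => e
  | p+1, e =>
    altEndLoop xs n p
      (e.set p (if p+1 < n ∧ xs.getD (p+1) 0 = xs.getD p 0 + 1 then e.getD (p+1) 0 else ((p : Int)+1)))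

-- forward sweep 'for p in range(n)'
def altStartLoop (xs : List Int) (n : Nat) (p : Nat) (s : List Int) : List Int :=
  if p < n then
    altStartLoop xs n (p+1)
      (s.set p (if 0 < p ∧ xs.getD p 0 = xs.getD (p-1) 0 + 1 then s.getD (p-1) 0 else (p : Int)))
  else s
  termination_by n - p

-- '{flagged_indices[p]: end[p] - start[p] for p in range(n)}' (left-to-right inserts)
def altFill (xs e s : List Int) (n : Nat) (d : PySem.Dict Int Int) (p : Nat) : PySem.Dict Int Int :=
  if p < n then altFill xs e s n (d.insert (xs.getD p 0) (e.getD p 0 - s.getD p 0)) (p+1) else d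
  termination_by n - p

def build_cluster_lookup_py_alt (flagged_indices : List Int) : List (Int × Int) :=
  let n := flagged_indices.length
  let e := altEndLoop flagged_indices n n (List.replicate n 0)
  let s := altStartLoop flagged_indices n 0 (List.replicate n 0)
  (altFill flagged_indices e s n PySem.Dict.empty 0).items

-- ===== PRECONDITION & SPEC =====
def Spec_build_cluster_lookup_py (flagged_indices : List Int) (out : List (Int × Int)) : Prop := out = build_cluster_lookup_py_alt flagged_indices
instance (flagged_indices : List Int) (out : List (Int × Int)) : Decidable (Spec_build_cluster_lookup_py flagged_indices out) := by unfold Spec_build_cluster_lookup_py; infer_instance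

-- ===== CLAIM (what is proved, stated in full; the proofs are below) =====
def Claim_equal_build_cluster_lookup_py : Prop := ∀ (flagged_indices : List Int), Dom_build_cluster_lookup_py flagged_indices → Spec_build_cluster_lookup_py flagged_indices (build_cluster_lookup_py flagged_indices)

-- ===== LEMMAS AND PROOFS =====

-- exclusive end of the +1-run containing p (matches the backward-sweep recurrence)
def runEnd (xs : List Int) (n : Nat) (p : Nat) : Nat :=
  if h : p+1 < n ∧ xs.getD (p+1) 0 = xs.getD p 0 + 1 then runEnd xs n (p+1) else p+1
  termination_by n - p
  decreasing_by omega

-- start of the +1-run containing p (matches the forward-sweep recurrence)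
def runStart (xs : List Int) : Nat → Nat
  | 0 => 0
  | p+1 => if xs.getD (p+1) 0 = xs.getD p 0 + 1 then runStart xs p else p+1

theorem set_getD (l : List Int) (m : Nat) (v : Int) (q : Nat) (hm : m < l.length) :
    (l.set m v).getD q 0 = if q = m then v else l.getD q 0 := by
  rcases eq_or_ne q m with rfl | hq
  · simp [List.getD_eq_getElem?_getD, hm]
  · simp [List.getD_eq_getElem?_getD, List.getElem?_set_ne (by omega : m ≠ q), hq]

theorem endLoop_spec (xs : List Int) (n : Nat) :
    ∀ (m : Nat) (e : List Int), m ≤ n → e.length = n →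
      (∀ q, m ≤ q → q < n → e.getD q 0 = (runEnd xs n q : Int)) →
      (∀ q, q < n → (altEndLoop xs n m e).getD q 0 = (runEnd xs n q : Int)) := by
  intro m
  induction m with
  | zero => intro e _ _ hinv q hq; exact hinv q (by omega) hq
  | succ m ih =>
    intro e hm he hinv q hq
    show (altEndLoop xs n m _).getD q 0 = _
    refine ih _ (by omega) (by simpa using he) ?_ q hq
    intro r hr hrn
    rw [set_getD _ _ _ _ (by omega)]
    rcases eq_or_ne r m with rfl | hne
    · rw [if_pos rfl]
      by_cases hc : r+1 < n ∧ xs.getD (r+1) 0 = xs.getD r 0 + 1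
      · rw [if_pos hc, hinv (r+1) (by omega) hc.1]
        conv_rhs => rw [runEnd, dif_pos hc]
      · rw [if_neg hc, runEnd, dif_neg hc]; push_cast; ring
    · rw [if_neg hne]; exact hinv r (by omega) hrn

theorem startLoop_spec (xs : List Int) (n : Nat) :
    ∀ (p : Nat) (s : List Int), s.length = n →
      (∀ q, q < p → q < n → s.getD q 0 = (runStart xs q : Int)) →
      (∀ q, q < n → (altStartLoop xs n p s).getD q 0 = (runStart xs q : Int)) := by
  intro p
  induction hp : n - p using Nat.strong_induction_on generalizing p with
  | _ k ih =>
    intro s hs hinv q hq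
    rw [altStartLoop]
    by_cases hpn : p < n
    · rw [if_pos hpn]
      refine ih (n - (p+1)) (by omega) (p+1) rfl _ (by simpa using hs) ?_ q hq
      intro r hr hrn
      rw [set_getD _ _ _ _ (by omega)]
      rcases eq_or_ne r p with rfl | hne
      · rw [if_pos rfl]
        by_cases hc : 0 < r ∧ xs.getD r 0 = xs.getD (r-1) 0 + 1
        · obtain ⟨hr0, hcc⟩ := hc
          obtain ⟨r', rfl⟩ : ∃ r', r = r' + 1 := ⟨r - 1, by omega⟩
          simp only [Nat.add_sub_cancel] at hcc ⊢
          rw [if_pos ⟨hr0, by simpa using hcc⟩, hinv r' (by omega) (by omega)]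
          show _ = ((runStart xs (r'+1) : Nat) : Int)
          simp only [runStart]
          rw [if_pos (by simpa using hcc)]
        · rw [if_neg hc]
          rcases Nat.eq_zero_or_pos r with rfl | hr0
          · simp [runStart]
          · obtain ⟨r', rfl⟩ : ∃ r', r = r' + 1 := ⟨r - 1, by omega⟩
            have : ¬ xs.getD (r'+1) 0 = xs.getD r' 0 + 1 := by
              intro hcc; exact hc ⟨hr0, by simpa using hcc⟩
            show _ = ((runStart xs (r'+1) : Nat) : Int)
            simp only [runStart]
            rw [if_neg this]
      · rw [if_neg hne]; exact hinv r (by omega) hrn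
    · rw [if_neg hpn]; exact hinv q (by omega) hq

theorem runEnd_stop (xs : List Int) (n p : Nat)
    (h : ¬ (p+1 < n ∧ xs.getD (p+1) 0 = xs.getD p 0 + 1)) : runEnd xs n p = p+1 := by
  unfold runEnd; rw [dif_neg h]

-- in a maximal run [i, p): every position's runEnd is p
theorem runEnd_run (xs : List Int) (n p : Nat) (hpn : p ≤ n)
    (hbr : p = n ∨ ¬ xs.getD p 0 = xs.getD (p-1) 0 + 1) (k : Nat) (hk : k < p)
    (hrun : ∀ m, k < m → m < p → xs.getD m 0 = xs.getD (m-1) 0 + 1) :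
      runEnd xs n k = p := by
  by_cases hkp : k + 1 = p
  · refine runEnd_stop xs n k ?_ |>.trans (by omega)
    rintro ⟨h1, h2⟩
    rcases hbr with rfl | hbr
    · omega
    · exact hbr (by rw [← hkp] at hbr ⊢; simpa using h2)
  · have hc : k+1 < n ∧ xs.getD (k+1) 0 = xs.getD k 0 + 1 :=
      ⟨by omega, by simpa using hrun (k+1) (by omega) (by omega)⟩
    rw [runEnd, dif_pos hc]
    exact runEnd_run xs n p hpn hbr (k+1) (by omega) (fun m h1 h2 => hrun m (by omega) h2)
  termination_by p - k
  decreasing_by omega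

-- in a maximal run [i, p): every position's runStart is i
theorem runStart_run (xs : List Int) (i : Nat)
    (hst : i = 0 ∨ ¬ xs.getD i 0 = xs.getD (i-1) 0 + 1) (k : Nat) (hik : i ≤ k)
    (hrun : ∀ m, i < m → m ≤ k → xs.getD m 0 = xs.getD (m-1) 0 + 1) :
      runStart xs k = i := by
  rcases Nat.eq_or_lt_of_le hik with rfl | hlt
  · rcases Nat.eq_zero_or_pos i with rfl | hk0
    · rfl
    · obtain ⟨k', rfl⟩ : ∃ k', i = k' + 1 := ⟨i - 1, by omega⟩
      rcases hst with h | h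
      · omega
      · show runStart xs (k'+1) = _
        simp only [runStart]
        rw [if_neg (by simpa using h)]
  · obtain ⟨k', rfl⟩ : ∃ k', k = k' + 1 := ⟨k - 1, by omega⟩
    show runStart xs (k'+1) = _
    simp only [runStart]
    rw [if_pos (by simpa using hrun (k'+1) (by omega) le_rfl)]
    exact runStart_run xs i hst k' (by omega) (fun m h1 h2 => hrun m h1 (by omega))
  termination_by k

theorem slice_cons (xs : List Int) (i p : Nat) (hip : i < p) (hp : p ≤ xs.length) :
    (xs.drop i).take (p - i) = xs.getD i 0 :: (xs.drop (i+1)).take (p - (i+1)) := by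
  have hi : i < xs.length := by omega
  rw [List.drop_eq_getElem_cons hi]
  have h1 : p - i = (p - (i+1)) + 1 := by omega
  rw [h1, List.take_succ_cons, List.getD_eq_getElem?_getD, List.getElem?_eq_getElem hi]
  rfl

-- a block of altFill that covers exactly one maximal run equals a constant-value flush
theorem fill_seg (xs e s : List Int) (n : Nat) (L : Int) :
    ∀ (i p : Nat) (c : PySem.Dict Int Int), i ≤ p → p ≤ n → n = xs.length →
      (∀ k, i ≤ k → k < p → e.getD k 0 - s.getD k 0 = L) →
      altFill xs e s n c i
        = altFill xs e s n (((xs.drop i).take (p - i)).foldl (fun d x => d.insert x L) c) p := by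
  intro i p c hip hpn hn hval
  rcases Nat.eq_or_lt_of_le hip with rfl | hlt
  · simp
  · rw [slice_cons xs i p hlt (by omega), List.foldl_cons]
    rw [altFill, if_pos (by omega : i < n), hval i le_rfl (by omega)]
    exact fill_seg xs e s n L (i+1) p _ (by omega) hpn hn (fun k h1 h2 => hval k (by omega) h2)
  termination_by i p => p - i
  decreasing_by omega

theorem getLast?_slice (xs : List Int) (i p : Nat) (hip : i < p) (hp : p ≤ xs.length) :
    ((xs.drop i).take (p - i)).getLast? = some (xs.getD (p - 1) 0) := by
  have hlen : ((xs.drop i).take (p - i)).length = p - i := by simp; omega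
  have h1 : p - 1 < xs.length := by omega
  rw [List.getLast?_eq_getElem?, hlen, List.getElem?_take_of_lt (by omega),
      List.getElem?_drop, List.getD_eq_getElem?_getD, List.getElem?_eq_getElem h1]
  have : i + (p - i - 1) = p - 1 := by omega
  rw [this]
  simp

theorem flush_eq_foldl (xs : List Int) (i p : Nat) (c : PySem.Dict Int Int)
    (_hip : i ≤ p) (hp : p ≤ xs.length) :
    pyA_flush c ((xs.drop i).take (p - i))
      = ((xs.drop i).take (p - i)).foldl (fun d x => d.insert x (((p - i : Nat) : Int))) c := by
  have hlen : ((xs.drop i).take (p - i)).length = p - i := by simp; omega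
  unfold pyA_flush
  rw [hlen]

-- main simulation: A's loop at state (cur = xs[i:p], rest = xs[p:]) equals B's fill loop at i,
-- provided e/s hold the run-end/run-start values and [i,p) is inside one run starting at i
theorem main_sim (xs e s : List Int) (n : Nat) (hn : n = xs.length)
    (hE : ∀ q, q < n → e.getD q 0 = (runEnd xs n q : Int))
    (hS : ∀ q, q < n → s.getD q 0 = (runStart xs q : Int)) :
    ∀ p i c, i < p → p ≤ n →
      (i = 0 ∨ ¬ xs.getD i 0 = xs.getD (i-1) 0 + 1) →
      (∀ k, i < k → k < p → xs.getD k 0 = xs.getD (k-1) 0 + 1) →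
      pyA_loop c ((xs.drop i).take (p - i)) (xs.drop p) = altFill xs e s n c i := by
  intro p i c hip hpn hst hrun
  have hlast : (PySem.List.pyGet? ((xs.drop i).take (p - i)) (-1)).getD 0
      = xs.getD (p - 1) 0 := by
    rw [PySem.List.pyGet?_neg_one, getLast?_slice xs i p hip (by omega)]
    rfl
  have hseg : ∀ hbr : p = n ∨ ¬ xs.getD p 0 = xs.getD (p-1) 0 + 1,
      altFill xs e s n c i
        = altFill xs e s n (pyA_flush c ((xs.drop i).take (p - i))) p := by
    intro hbr
    rw [flush_eq_foldl xs i p c (by omega) (by omega)]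
    refine fill_seg xs e s n _ i p c (by omega) hpn hn ?_
    intro k h1 h2
    rw [hE k (by omega), hS k (by omega),
        runEnd_run xs n p hpn hbr k h2 (fun m hm1 hm2 => hrun m (by omega) hm2),
        runStart_run xs i hst k h1 (fun m hm1 hm2 => hrun m hm1 (by omega))]
    omega
  by_cases hpe : p = n
  · -- rest is empty: A does the trailing flush; B's fill from i covers the last run
    have hdrop : xs.drop p = [] := by rw [hpe, hn]; simp
    rw [hdrop]
    show pyA_flush c _ = _
    rw [hseg (Or.inl hpe), hpe, altFill, if_neg (by omega)]
  · have hplen : p < xs.length := by omega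
    have hdrop : xs.drop p = xs.getD p 0 :: xs.drop (p + 1) := by
      rw [List.drop_eq_getElem_cons hplen, List.getD_eq_getElem?_getD,
          List.getElem?_eq_getElem hplen]
      rfl
    rw [hdrop]
    show pyA_loop c _ (_ :: _) = _
    rw [pyA_loop, hlast]
    by_cases hcons : xs.getD p 0 = xs.getD (p - 1) 0 + 1
    · rw [if_pos hcons]
      have hext : (xs.drop i).take (p - i) ++ [xs.getD p 0]
          = (xs.drop i).take (p + 1 - i) := by
        have h2 : p + 1 - i = (p - i) + 1 := by omega
        rw [h2, List.take_add_one, List.getElem?_drop, List.getD_eq_getElem?_getD]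
        have h3 : i + (p - i) = p := by omega
        rw [h3, List.getElem?_eq_getElem hplen]
        simp
      rw [hext]
      exact main_sim xs e s n hn hE hS (p + 1) i c (by omega) (by omega) hst
        (fun k hk1 hk2 => by
          rcases Nat.lt_or_ge k p with h | h
          · exact hrun k hk1 h
          · have : k = p := by omega
            subst this; exact hcons)
    · rw [if_neg hcons]
      have hsingle : [xs.getD p 0] = (xs.drop p).take (p + 1 - p) := by
        have h1 : p + 1 - p = 1 := by omega
        rw [h1, hdrop]; rfl
      rw [hsingle,
          main_sim xs e s n hn hE hS (p + 1) p (pyA_flush c ((xs.drop i).take (p - i)))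
            (by omega) (by omega) (Or.inr hcons) (fun k hk1 hk2 => by omega),
          hseg (Or.inr hcons)]
  termination_by p _ _ => n - p
  decreasing_by all_goals omega

-- ===== VERDICT (by name: the statement is the Claim_ definition above) =====
theorem build_cluster_lookup_py_spec : Claim_equal_build_cluster_lookup_py := by
  intro xs _
  show build_cluster_lookup_py xs = build_cluster_lookup_py_alt xs
  cases xs with
  | nil =>
    show (PySem.Dict.empty : PySem.Dict Int Int).items = _
    simp only [build_cluster_lookup_py_alt, List.length_nil, List.replicate]
    rw [altEndLoop, altStartLoop, if_neg (by omega), altFill, if_neg (by omega)]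
  | cons x rest =>
    unfold build_cluster_lookup_py_alt
    set xs := x :: rest with hxs
    have hn : xs.length = xs.length := rfl
    have hE := endLoop_spec xs xs.length xs.length (List.replicate xs.length 0) le_rfl
      (by simp) (fun q h1 h2 => by omega)
    have hS := startLoop_spec xs xs.length 0 (List.replicate xs.length 0) (by simp)
      (fun q h1 h2 => by omega)
    have h := main_sim xs _ _ xs.length rfl hE hS 1 0 PySem.Dict.empty
      (by omega) (by simp [hxs]) (Or.inl rfl) (fun k hk1 hk2 => by omega)
    have e1 : List.take (1 - 0) (List.drop 0 xs) = [x] := by simp [hxs]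
    have e2 : List.drop 1 xs = rest := by simp [hxs]
    rw [e1, e2] at h
    exact congrArg PySem.Dict.items h
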